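-- pv_equiv track=rewrite | github.com/gcheng9430/InterviewPrep | Guo/22mock.py | solution
-- ===== SOURCE A (Python) =====
-- def solution(ratings):
--     if not ratings:
--         return 0
--
--     n = len(ratings)
--     left = 0
--     right = 0
--     prev = ratings[0]+1
--     count = 0
--     while right<n:
--         curr = ratings[right]
--         if curr!=prev-1:
--             #process the previous one
--             leng = right-left
--             count += (1+leng)*leng//2
--             #reset subarray
--             left = right
--         prev = curr
--         right+=1
--     #process the last subarray we found
--     leng = right-left
--     count += (1+leng)*leng//2
--     return count
-- ===== SOURCE B (Python) =====
-- def solution(ratings):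
--     count = 0
--     cur = 0
--     prev = None
--     for x in ratings:
--         cur = cur + 1 if prev is not None and x == prev - 1 else 1
--         count += cur
--         prev = x
--     return count
-- ===== Notes on version B (the rewrite author's own statement) =====
-- stated objective: simpler
-- what changed: Replaced the two-pointer run detection with closed-form triangular sums by a single per-element accumulator that counts subarrays ending at each index.
import Mathlib
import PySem

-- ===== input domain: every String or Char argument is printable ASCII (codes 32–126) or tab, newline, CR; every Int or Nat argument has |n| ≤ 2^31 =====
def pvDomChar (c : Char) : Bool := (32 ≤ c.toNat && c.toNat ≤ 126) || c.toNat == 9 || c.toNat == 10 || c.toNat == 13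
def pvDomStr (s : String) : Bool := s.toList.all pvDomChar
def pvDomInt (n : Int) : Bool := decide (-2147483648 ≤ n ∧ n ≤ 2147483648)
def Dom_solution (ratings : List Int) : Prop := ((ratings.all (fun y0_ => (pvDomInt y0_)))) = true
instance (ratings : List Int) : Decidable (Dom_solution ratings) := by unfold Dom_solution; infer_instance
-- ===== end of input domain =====

-- B replaces A's two-pointer run detection plus triangular-number summation by a single
-- per-element accumulator counting the decreasing-by-1 subarrays ending at each index (objective: simpler).


-- ===== PORT A =====
-- A's while loop scans `right` from 0 to n; ported as recursion on the remaining suffix,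
-- carrying (right, left, prev, count) exactly as A does; `curr = ratings[right]` is the suffix head.
def solutionLoopA : List Int → Int → Int → Int → Int → Int
  | [], right, left, _, count =>
      -- process the last subarray we found
      count + PySem.Int.floordiv ((1 + (right - left)) * (right - left)) 2
  | curr :: rest, right, left, prev, count =>
      if curr ≠ prev - 1 then
        solutionLoopA rest (right + 1) right curr
          (count + PySem.Int.floordiv ((1 + (right - left)) * (right - left)) 2)
      else
        solutionLoopA rest (right + 1) left curr count

def solution (ratings : List Int) : Int :=
  match ratings with
  | [] => 0
  | r0 :: _ => solutionLoopA ratings 0 0 (r0 + 1) 0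

-- ===== PORT B =====
def solutionLoopB : List Int → Int → Int → Option Int → Int
  | [], count, _, _ => count
  | x :: rest, count, cur, prev =>
      let cur' := if prev = some (x + 1) then cur + 1 else 1
      solutionLoopB rest (count + cur') cur' (some x)

def solution_alt (ratings : List Int) : Int :=
  solutionLoopB ratings 0 0 none

-- ===== PRECONDITION & SPEC =====
def Spec_solution (ratings : List Int) (out : Int) : Prop := out = solution_alt ratings
instance (ratings : List Int) (out : Int) : Decidable (Spec_solution ratings out) := by unfold Spec_solution; infer_instance

-- ===== CLAIM (what is proved, stated in full; the proofs are below) =====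
def Claim_equal_solution : Prop := ∀ (ratings : List Int), Dom_solution ratings → Spec_solution ratings (solution ratings)

-- ===== LEMMAS AND PROOFS =====

-- tri L = L(L+1)/2, the triangular count A adds per run
def pvTri (L : Int) : Int := PySem.Int.floordiv ((1 + L) * L) 2

theorem pvTri_succ (L : Int) : pvTri L + (L + 1) = pvTri (L + 1) := by
  obtain ⟨k, hk⟩ : Even (L * (L + 1)) := Int.even_mul_succ_self L
  have h1 : (1 + L) * L = 2 * k := by linear_combination hk
  have h2 : (1 + (L + 1)) * (L + 1) = 2 * (k + L + 1) := by linear_combination hk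
  simp only [pvTri, PySem.Int.floordiv, h1, h2]
  rw [Int.mul_fdiv_cancel_left _ (by norm_num), Int.mul_fdiv_cancel_left _ (by norm_num)]
  omega

-- invariant: A's loop state (right,left,prev,count) corresponds to B's (count + tri(run), run, some prev)
theorem loop_invariant (rest : List Int) :
    ∀ (right left prev count : Int),
      solutionLoopA rest right left prev count =
      solutionLoopB rest (count + pvTri (right - left)) (right - left) (some prev) := by
  induction rest with
  | nil => intro right left prev count; simp [solutionLoopA, solutionLoopB, pvTri]
  | cons x rest ih =>
      intro right left prev count
      simp only [solutionLoopA, solutionLoopB]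
      by_cases h : x = prev - 1
      · rw [if_neg (show ¬ x ≠ prev - 1 by omega),
           if_pos (show some prev = some (x + 1) by rw [show x + 1 = prev by omega]), ih]
        rw [show right + 1 - left = (right - left) + 1 by ring, ← pvTri_succ]
        simp only [pvTri]
        ring_nf
      · rw [if_pos h, if_neg (show ¬ (some prev = some (x + 1)) by simp; omega), ih]
        rw [show right + 1 - right = (1:Int) by ring, show pvTri 1 = 1 by decide]
        simp only [pvTri]

-- ===== VERDICT (by name: the statement is the Claim_ definition above) =====
theorem solution_spec : Claim_equal_solution := by
  intro ratings _
  unfold Spec_solution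
  match ratings with
  | [] => rfl
  | r0 :: rest =>
      show solutionLoopA (r0 :: rest) 0 0 (r0 + 1) 0 = solutionLoopB (r0 :: rest) 0 0 none
      have h : ¬ (r0 ≠ (r0 + 1) - 1) := by omega
      simp only [solutionLoopA, solutionLoopB, if_neg h]
      have hp : ¬ ((none : Option Int) = some (r0 + 1)) := by simp
      simp only [if_neg hp]
      rw [loop_invariant]
      norm_num
      rw [show pvTri 1 = 1 by decide]
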